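-- pv_equiv track=rewrite | github.com/simonfranckx/python-code-reeks0-5 | levensspel.py | tel_populatie
-- ===== SOURCE A (Python) =====
-- def tel_populatie(matrix):
--     som_s = 0
--     som_i = 0
--     som_r = 0
--
--     for rij in matrix:
--         s = rij.count('S')
--         som_s+=s
--         i = rij.count('I')
--         som_i+=i
--         r = rij.count('R')
--         som_r+=r
--
--     return(som_s,som_i,som_r)
-- ===== SOURCE B (Python) =====
-- def tel_populatie(matrix):
--     som_s = 0
--     som_i = 0
--     som_r = 0
--     for ch in "".join(matrix):
--         if ch == 'S':
--             som_s += 1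
--         elif ch == 'I':
--             som_i += 1
--         elif ch == 'R':
--             som_r += 1
--     return (som_s, som_i, som_r)
-- ===== Notes on version B (the rewrite author's own statement) =====
-- stated objective: simpler
-- what changed: Flattens the matrix once with ''.join and makes a single character-level pass with an if/elif chain incrementing three accumulators, instead of three separate str.count scans over every row.
import Mathlib
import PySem

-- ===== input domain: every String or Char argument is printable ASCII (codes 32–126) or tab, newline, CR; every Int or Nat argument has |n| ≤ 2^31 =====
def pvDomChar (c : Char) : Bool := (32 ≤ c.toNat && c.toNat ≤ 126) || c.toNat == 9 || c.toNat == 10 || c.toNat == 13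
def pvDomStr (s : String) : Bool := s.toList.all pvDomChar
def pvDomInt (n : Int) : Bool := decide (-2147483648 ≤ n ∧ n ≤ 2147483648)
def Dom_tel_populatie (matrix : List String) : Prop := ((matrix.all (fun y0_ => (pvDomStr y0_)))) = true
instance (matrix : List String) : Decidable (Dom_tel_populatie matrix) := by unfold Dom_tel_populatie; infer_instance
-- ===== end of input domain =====

-- B flattens the matrix once and makes a single character-level pass with an if/elif chain over three accumulators, instead of three str.count scans per row (simpler single pass).

-- ===== PORT A =====
def tel_populatie (matrix : List String) : Int × Int × Int :=
  let res := matrix.foldl (fun acc rij =>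
    let s := PySem.Str.count rij "S"
    let som_s := acc.1 + (s : Int)
    let i := PySem.Str.count rij "I"
    let som_i := acc.2.1 + (i : Int)
    let r := PySem.Str.count rij "R"
    let som_r := acc.2.2 + (r : Int)
    (som_s, som_i, som_r)) (0, 0, 0)
  res

-- ===== PORT B =====
-- "".join(matrix) = the concatenation of all rows' characters
def tel_populatie_alt (matrix : List String) : Int × Int × Int :=
  ((matrix.map String.toList).flatten).foldl (fun acc ch =>
    if ch = 'S' then (acc.1 + 1, acc.2.1, acc.2.2)
    else if ch = 'I' then (acc.1, acc.2.1 + 1, acc.2.2)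
    else if ch = 'R' then (acc.1, acc.2.1, acc.2.2 + 1)
    else acc) (0, 0, 0)

-- ===== PRECONDITION & SPEC =====
def Spec_tel_populatie (matrix : List String) (out : Int × Int × Int) : Prop := out = tel_populatie_alt matrix
instance (matrix : List String) (out : Int × Int × Int) : Decidable (Spec_tel_populatie matrix out) := by unfold Spec_tel_populatie; infer_instance

-- ===== CLAIM (what is proved, stated in full; the proofs are below) =====
def Claim_equal_tel_populatie : Prop := ∀ (matrix : List String), Dom_tel_populatie matrix → Spec_tel_populatie matrix (tel_populatie matrix)

-- ===== LEMMAS AND PROOFS =====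

-- s.count(c) for a single character c is the character count of the string
theorem chars_count_go_single (c : Char) : ∀ (fuel : Nat) (l : List Char) (acc : Nat),
    l.length ≤ fuel → PySem.Chars.count.go [c] fuel l acc = acc + l.count c := by
  intro fuel
  induction fuel with
  | zero =>
    intro l acc h
    have : l = [] := List.eq_nil_of_length_eq_zero (Nat.le_zero.mp h)
    subst this
    simp [PySem.Chars.count.go]
  | succ n ih =>
    intro l acc h
    cases l with
    | nil => simp [PySem.Chars.count.go]
    | cons hd t =>
      rw [PySem.Chars.count.go]
      by_cases hc : c = hd
      · subst hc
        simp only [List.isPrefixOf, BEq.rfl, Bool.and_self, if_true,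
          List.length_singleton, List.drop_one, List.tail_cons]
        rw [ih t (acc + 1) (by simp at h; omega)]
        rw [List.count_cons_self]
        omega
      · have hpre : [c].isPrefixOf (hd :: t) = false := by
          simp [List.isPrefixOf]
          exact fun habs => hc habs
        rw [hpre]
        simp only [if_false, Bool.false_eq_true]
        rw [ih t acc (by simp at h; omega)]
        rw [List.count_cons_of_ne (fun habs => hc habs.symm)]

theorem chars_count_single (cs : List Char) (c : Char) :
    PySem.Chars.count cs [c] = cs.count c := by
  unfold PySem.Chars.count
  simp only [List.isEmpty_cons, if_false, Bool.false_eq_true]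
  rw [chars_count_go_single c cs.length cs 0 (le_refl _)]; omega

theorem str_count_single (s : String) (c : Char) :
    PySem.Str.count s (String.ofList [c]) = s.toList.count c := by
  rw [PySem.Str.count_eq]
  have : (String.ofList [c]).toList = [c] := by simp
  rw [this]
  exact chars_count_single s.toList c

-- A's loop is the componentwise sum of the three per-row counts
theorem afold_eq (matrix : List String) :
    ∀ (a b c : Int),
      matrix.foldl (fun acc rij =>
        let s := PySem.Str.count rij "S"
        let som_s := acc.1 + (s : Int)
        let i := PySem.Str.count rij "I"
        let som_i := acc.2.1 + (i : Int)
        let r := PySem.Str.count rij "R"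
        let som_r := acc.2.2 + (r : Int)
        (som_s, som_i, som_r)) (a, b, c)
      = (a + ((matrix.map (fun rij => (rij.toList.count 'S' : Int))).sum),
         b + ((matrix.map (fun rij => (rij.toList.count 'I' : Int))).sum),
         c + ((matrix.map (fun rij => (rij.toList.count 'R' : Int))).sum)) := by
  induction matrix with
  | nil => intro a b c; simp
  | cons hd t ih =>
    intro a b c
    simp only [List.foldl_cons, List.map_cons, List.sum_cons]
    rw [ih]
    have hS : PySem.Str.count hd "S" = hd.toList.count 'S' := str_count_single hd 'S'
    have hI : PySem.Str.count hd "I" = hd.toList.count 'I' := str_count_single hd 'I'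
    have hR : PySem.Str.count hd "R" = hd.toList.count 'R' := str_count_single hd 'R'
    simp only [hS, hI, hR, Prod.mk.injEq]
    refine ⟨by ring, by ring, by ring⟩

-- B's character loop is the componentwise sum of the three counts
theorem bfold_eq (cs : List Char) :
    ∀ (a b c : Int),
      cs.foldl (fun acc ch =>
        if ch = 'S' then (acc.1 + 1, acc.2.1, acc.2.2)
        else if ch = 'I' then (acc.1, acc.2.1 + 1, acc.2.2)
        else if ch = 'R' then (acc.1, acc.2.1, acc.2.2 + 1)
        else acc) (a, b, c)
      = (a + (cs.count 'S' : Int), b + (cs.count 'I' : Int), c + (cs.count 'R' : Int)) := by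
  induction cs with
  | nil => intro a b c; simp
  | cons hd t ih =>
    intro a b c
    simp only [List.foldl_cons]
    split_ifs with hS hI hR
    · subst hS
      rw [ih, List.count_cons_self,
          List.count_cons_of_ne (by decide : ('S' : Char) ≠ 'I'),
          List.count_cons_of_ne (by decide : ('S' : Char) ≠ 'R')]
      simp only [Prod.mk.injEq, Nat.cast_add, Nat.cast_one, and_true]
      omega
    · subst hI
      rw [ih, List.count_cons_self,
          List.count_cons_of_ne (by decide : ('I' : Char) ≠ 'S'),
          List.count_cons_of_ne (by decide : ('I' : Char) ≠ 'R')]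
      simp only [Prod.mk.injEq, Nat.cast_add, Nat.cast_one, and_true, true_and]
      omega
    · subst hR
      rw [ih, List.count_cons_self,
          List.count_cons_of_ne (by decide : ('R' : Char) ≠ 'S'),
          List.count_cons_of_ne (by decide : ('R' : Char) ≠ 'I')]
      simp only [Prod.mk.injEq, Nat.cast_add, Nat.cast_one, true_and]
      omega
    · rw [ih, List.count_cons_of_ne hS,
          List.count_cons_of_ne hI,
          List.count_cons_of_ne hR]

-- counting in the flattened list is summing the per-row counts
theorem count_flatten (matrix : List String) (c : Char) :
    (((matrix.map String.toList).flatten).count c : Int)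
      = ((matrix.map (fun rij => (rij.toList.count c : Int))).sum) := by
  induction matrix with
  | nil => simp
  | cons hd t ih =>
    simp only [List.map_cons, List.flatten_cons, List.count_append, List.sum_cons]
    push_cast
    rw [ih]

-- ===== VERDICT (by name: the statement is the Claim_ definition above) =====
theorem tel_populatie_spec : Claim_equal_tel_populatie := by
  intro matrix _
  unfold Spec_tel_populatie tel_populatie tel_populatie_alt
  rw [afold_eq, bfold_eq]
  simp only [count_flatten, zero_add]
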